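-- pv_equiv track=rewrite | github.com/tomchuk55/TorProject | torClient.py | tDecode
-- ===== SOURCE A (Python) =====
-- def tDecode(data, key):
--     key = int(key)
--     newdata = ""
--     for x in data:
--         temp = ord(x) - key
--         if temp > 256:
--             temp -= 256
--         elif temp < 0:
--             temp += 256
--         newdata += chr(temp)
--     return newdata
-- ===== SOURCE B (Python) =====
-- def _dec(s, k):
--     if not s:
--         return ""
--     t = ord(s[0]) - k
--     if t > 256:
--         t -= 256
--     elif t < 0:
--         t += 256
--     return chr(t) + _dec(s[1:], k)
--
-- def tDecode(data, key):
--     return _dec(data, int(key))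
-- ===== Notes on version B (the rewrite author's own statement) =====
-- stated objective: alternative
-- what changed: B replaces A's iterative accumulator loop (newdata += ...) with a structural recursion on the string: decode the first character and cons it onto the recursive decode of the rest.
import Mathlib
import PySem

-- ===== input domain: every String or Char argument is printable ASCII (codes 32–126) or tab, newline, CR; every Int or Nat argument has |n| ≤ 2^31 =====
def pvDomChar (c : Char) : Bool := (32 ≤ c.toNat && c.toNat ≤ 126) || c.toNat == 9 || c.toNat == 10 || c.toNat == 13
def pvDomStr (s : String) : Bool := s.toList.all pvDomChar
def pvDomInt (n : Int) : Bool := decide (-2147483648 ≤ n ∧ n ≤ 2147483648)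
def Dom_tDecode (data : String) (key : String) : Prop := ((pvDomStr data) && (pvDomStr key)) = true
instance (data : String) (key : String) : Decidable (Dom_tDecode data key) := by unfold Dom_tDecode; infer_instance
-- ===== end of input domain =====

-- B replaces A's iterative accumulator loop with a structural recursion on the string
-- (decode head, cons onto the recursive decode of the tail); equivalence proved on Pre_.

-- ===== PORT A =====
-- A: key = int(key); for x in data: newdata += chr(adjusted ord(x) - key); return newdata.
def tDecode (data : String) (key : String) : String :=
  match PySem.Int.ofStr? key with
  | none => ""   -- int(key) raises ValueError here; excluded by Pre_tDecode
  | some k =>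
    String.ofList (data.toList.foldl (fun newdata x =>
      let temp := (x.toNat : Int) - k
      let temp := if temp > 256 then temp - 256 else if temp < 0 then temp + 256 else temp
      newdata ++ [Char.ofNat temp.toNat]) [])

-- ===== PORT B =====
-- B's recursive helper _dec(s, k): empty → "", else chr(adjusted ord(s[0]) - k) + _dec(s[1:], k)
def pvDec (s : List Char) (k : Int) : List Char :=
  match s with
  | [] => []
  | c :: rest =>
    let t := (c.toNat : Int) - k
    let t := if t > 256 then t - 256 else if t < 0 then t + 256 else t
    Char.ofNat t.toNat :: pvDec rest k

def tDecode_alt (data : String) (key : String) : String :=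
  match PySem.Int.ofStr? key with
  | none => ""   -- int(key) raises ValueError here; excluded by Pre_tDecode
  | some k => String.ofList (pvDec data.toList k)

-- ===== PRECONDITION & SPEC =====
-- the single-wrap adjustment both programs apply to ord(x) - key
def pvAdj (t : Int) : Int := if t > 256 then t - 256 else if t < 0 then t + 256 else t

-- Pre_ excludes: keys on which int(key) raises ValueError; inputs where the adjusted code
-- is out of chr's range so chr raises ValueError; and inputs where some decoded code lands
-- in the surrogate range 0xD800–0xDFFF, where Python returns a string not representable as
-- a Lean String (both A and B return that same surrogate string there).
def Pre_tDecode (data : String) (key : String) : Prop :=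
  ((PySem.Int.ofStr? key).isSome &&
   data.toList.all (fun c =>
     let t := pvAdj ((c.toNat : Int) - (PySem.Int.ofStr? key).getD 0)
     decide (0 ≤ t) && decide (t ≤ 1114111) && (decide (t < 55296) || decide (57343 < t)))) = true
instance (data : String) (key : String) : Decidable (Pre_tDecode data key) := by
  unfold Pre_tDecode; infer_instance

def pvWitness_tDecode : String × String := ("Khoor", "3")

def Spec_tDecode (data : String) (key : String) (out : String) : Prop := out = tDecode_alt data key
instance (data : String) (key : String) (out : String) : Decidable (Spec_tDecode data key out) := by unfold Spec_tDecode; infer_instance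

-- ===== CLAIM (what is proved, stated in full; the proofs are below) =====
def Claim_equal_tDecode : Prop := ∀ (data : String) (key : String), Dom_tDecode data key → Pre_tDecode data key → Spec_tDecode data key (tDecode data key)

-- ===== LEMMAS AND PROOFS =====

-- B's recursion computes the same map over the characters as A's fold-with-append
lemma pvDec_eq_map (k : Int) : ∀ (l : List Char),
    pvDec l k = l.map (fun c => Char.ofNat (pvAdj ((c.toNat : Int) - k)).toNat) := by
  intro l
  induction l with
  | nil => rfl
  | cons c rest ih => simp [pvDec, pvAdj, ih]

-- ===== VERDICT (by name: the statement is the Claim_ definition above) =====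
theorem tDecode_spec : Claim_equal_tDecode := by
  intro data key _ _
  unfold Spec_tDecode tDecode tDecode_alt
  cases hk : PySem.Int.ofStr? key with
  | none => rfl
  | some k =>
    simp only []
    rw [PySem.List.foldl_append_singleton_eq_map, pvDec_eq_map]
    rfl
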